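-- pv_equiv track=rewrite | github.com/itsmemdtofik/Python | Arrays/Easy/RemoveAllOccurances.py | remove_all_occurrences
-- ===== SOURCE A (Python) =====
-- def remove_all_occurrences(arr, element):
--     """
--     Remove all occurrences of the given element from the array in place.
--     The function modifies the input array and returns the count of elements
--     that are not equal to the given element.
--
--     Parameters:
--     arr (list): The list of integers.
--     element (int): The element to be removed.
--
--     Returns:
--     int: The number of elements that are not equal to the given element.
--     """
--     if not arr:
--         return 0
--
--     count = 0
--     for i in range(len(arr)):
--         if arr[i] != element:
--             arr[count] = arr[i]
--             count += 1
--
--     return count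
-- ===== SOURCE B (Python) =====
-- def remove_all_occurrences(arr, element):
--     # Complement counting: the answer is len(arr) minus the number of occurrences
--     # removed. arr is left unmodified (A compacts it in place; the proved
--     # equivalence is about the return value only).
--     return len(arr) - arr.count(element)
-- ===== Notes on version B (the rewrite author's own statement) =====
-- stated objective: simpler
-- what changed: B computes the answer arithmetically as len(arr) - arr.count(element) (counting the complement), never collecting or placing kept elements; A's in-place compaction side effect is not performed (return-value equivalence only).
import Mathlib
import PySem

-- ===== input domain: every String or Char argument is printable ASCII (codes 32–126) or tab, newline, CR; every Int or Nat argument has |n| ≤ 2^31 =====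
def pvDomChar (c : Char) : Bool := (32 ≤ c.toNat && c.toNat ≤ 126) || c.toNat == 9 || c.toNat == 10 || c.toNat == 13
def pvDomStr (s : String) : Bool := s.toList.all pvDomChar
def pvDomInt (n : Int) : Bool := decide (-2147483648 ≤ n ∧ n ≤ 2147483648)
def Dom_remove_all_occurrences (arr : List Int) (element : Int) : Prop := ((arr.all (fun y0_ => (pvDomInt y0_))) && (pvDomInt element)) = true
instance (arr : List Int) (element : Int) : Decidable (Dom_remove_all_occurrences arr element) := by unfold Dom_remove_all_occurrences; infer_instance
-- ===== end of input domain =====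

-- B returns len(arr) - arr.count(element) (complement counting) instead of A's in-place
-- two-pointer compaction; A mutates arr, B does not — equivalence is about the return value only.

-- ===== PORT A =====
-- state: (current contents of arr, count)
def removeStep (element : Int) (st : List Int × Int) (i : Int) : List Int × Int :=
  if PySem.List.pyGetD st.1 i 0 ≠ element then
    (PySem.List.pySetD st.1 st.2 (PySem.List.pyGetD st.1 i 0), st.2 + 1)
  else st

def remove_all_occurrences (arr : List Int) (element : Int) : Int :=
  if arr = [] then 0
  else ((PySem.List.pyRange 0 (arr.length : Int) 1).foldl (removeStep element) (arr, 0)).2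

-- ===== PORT B =====
-- return len(arr) - arr.count(element)
def remove_all_occurrences_alt (arr : List Int) (element : Int) : Int :=
  (arr.length : Int) - (PySem.List.count arr element : Int)

-- ===== PRECONDITION & SPEC =====
def Spec_remove_all_occurrences (arr : List Int) (element : Int) (out : Int) : Prop := out = remove_all_occurrences_alt arr element
instance (arr : List Int) (element : Int) (out : Int) : Decidable (Spec_remove_all_occurrences arr element out) := by unfold Spec_remove_all_occurrences; infer_instance

-- ===== CLAIM (what is proved, stated in full; the proofs are below) =====
def Claim_equal_remove_all_occurrences : Prop := ∀ (arr : List Int) (element : Int), Dom_remove_all_occurrences arr element → Spec_remove_all_occurrences arr element (remove_all_occurrences arr element)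

-- ===== LEMMAS AND PROOFS =====

-- Invariant of A's loop after the first n iterations: count equals the number of kept
-- elements among the first n, and the array is unchanged from position n on.
lemma remove_inv (arr : List Int) (element : Int) (n : Nat) (hn : n ≤ arr.length) :
    (((PySem.List.pyRange 0 (n : Int) 1).foldl (removeStep element) (arr, 0)).2
        = (((arr.take n).filter (fun x => x ≠ element)).length : Int))
    ∧ (((PySem.List.pyRange 0 (n : Int) 1).foldl (removeStep element) (arr, 0)).1.drop n
        = arr.drop n)
    ∧ (((PySem.List.pyRange 0 (n : Int) 1).foldl (removeStep element) (arr, 0)).1.length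
        = arr.length) := by
  induction n with
  | zero => simp
  | succ m ih =>
    obtain ⟨ih1, ih2, ih3⟩ := ih (Nat.le_of_succ_le hn)
    have hstep : (((m : Int)) + 1) = ((m + 1 : Nat) : Int) := by push_cast; ring
    have hsplit : PySem.List.pyRange 0 ((m + 1 : Nat) : Int) 1
        = PySem.List.pyRange 0 (m : Int) 1 ++ [(m : Int)] := by
      rw [← hstep, PySem.List.pyRange_one_succ_right (by positivity)]
    rw [hsplit, List.foldl_append]
    set st := (PySem.List.pyRange 0 (m : Int) 1).foldl (removeStep element) (arr, 0) with hst
    have hm : m < arr.length := hn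
    have hm1 : m < st.1.length := by omega
    -- the read at index m sees the original array
    have hread : PySem.List.pyGetD st.1 (m : Int) 0 = arr[m] := by
      rw [PySem.List.pyGetD_natCast, List.getD_eq_getElem _ _ hm1]
      have h2 : st.1[m + 0]? = arr[m + 0]? := by
        rw [← List.getElem?_drop, ih2, List.getElem?_drop]
      simp only [Nat.add_zero, List.getElem?_eq_getElem hm1, List.getElem?_eq_getElem hm] at h2
      exact Option.some.injEq _ _ ▸ h2 ▸ rfl
    -- count is nonneg and ≤ m
    have hcnt : 0 ≤ st.2 ∧ st.2 ≤ (m : Int) := by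
      constructor
      · rw [ih1]; positivity
      · rw [ih1]
        have := List.length_filter_le (fun x => decide (x ≠ element)) (arr.take m)
        have := List.length_take_le m arr
        omega
    simp only [List.foldl_cons, List.foldl_nil, removeStep]
    rw [hread]
    by_cases hne : arr[m] ≠ element
    · simp only [if_pos hne]
      refine ⟨?_, ?_, ?_⟩
      · simp only [ih1]
        rw [List.take_add_one, List.getElem?_eq_getElem hm, Option.toList_some, List.filter_append]
        simp [hne]
      · rw [PySem.List.pySetD_of_nonneg _ _ hcnt.1, List.drop_set,
            if_pos (by omega : st.2.toNat < m + 1)]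
        have := congrArg (List.drop 1) ih2
        simpa [List.drop_drop, Nat.add_comm] using this
      · rw [PySem.List.pySetD_of_nonneg _ _ hcnt.1]; simp [ih3]
    · simp only [if_neg hne]
      refine ⟨?_, ?_, ih3⟩
      · simp only [ih1]
        rw [List.take_add_one, List.getElem?_eq_getElem hm, Option.toList_some, List.filter_append]
        simp at hne
        simp [hne]
      · have := congrArg (List.drop 1) ih2
        simpa [List.drop_drop, Nat.add_comm] using this

-- len(filter ≠) = len - count
lemma filter_ne_length (arr : List Int) (element : Int) :
    ((arr.filter (fun x => x ≠ element)).length : Int)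
      = (arr.length : Int) - (arr.count element : Int) := by
  have h1 : arr.filter (fun x => x ≠ element) = arr.filter (fun x => !(x == element)) := by
    apply List.filter_congr; intro x _; simp; rfl
  have h2 := List.length_eq_countP_add_countP (p := fun x => x == element) (l := arr)
  have h3 : List.countP (fun a => !(a == element)) arr
      = List.countP (fun a => ¬(a == element) = true) arr := by
    apply List.countP_congr; intro x _; simp
  rw [h1, ← List.countP_eq_length_filter, List.count]
  omega

-- ===== VERDICT (by name: the statement is the Claim_ definition above) =====
theorem remove_all_occurrences_spec : Claim_equal_remove_all_occurrences := by
  intro arr element _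
  unfold Spec_remove_all_occurrences remove_all_occurrences remove_all_occurrences_alt
  by_cases h : arr = []
  · simp [h, PySem.List.count]
  · simp only [if_neg h]
    have := (remove_inv arr element arr.length le_rfl).1
    rw [this, List.take_length, filter_ne_length, PySem.List.count_eq]
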